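-- pv_equiv track=rewrite | github.com/jainamdoshi/Internet-Protocols-with-microBits | Part 3 receiver.py | check_hamming_code
-- ===== SOURCE A (Python) =====
-- def check_hamming_code(lst, parity, data):
--     occurence_of_1 = 0
--
--     #list if the parity bit is correct
--     lst1 = lst[:]
--
--     #list if the parity bit is not correct
--     lst2 = lst[:]
--
--     #Looping through every segment of the data
--     for data_index in range((2 ** parity), len(data), 2 ** (parity + 1)):
--
--         #Looping through every bit in the segment.
--         for bits_to_check in range(data_index, data_index+(2 ** parity)):
--             if bits_to_check >= len(data):
--                 break
--             if data[bits_to_check] == '1':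
--                 occurence_of_1 += 1
--             lst1[bits_to_check] = None
--             if lst2[bits_to_check] is not None:
--                 lst2[bits_to_check] += 1
--
--     if occurence_of_1 % 2 == 0:
--         return lst1
--     else:
--         return lst2
-- ===== SOURCE B (Python) =====
-- def check_hamming_code(lst, parity, data):
--     occurence_of_1 = 0
--     lst1 = lst[:]
--     lst2 = lst[:]
--     # single forward pass: bit `parity` of i tells whether this parity bit covers position i
--     for i in range(len(data)):
--         if (i >> parity) & 1:
--             if data[i] == '1':
--                 occurence_of_1 += 1
--             lst1[i] = None
--             if lst2[i] is not None:
--                 lst2[i] += 1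
--     if occurence_of_1 % 2 == 0:
--         return lst1
--     else:
--         return lst2
-- ===== Notes on version B (the rewrite author's own statement) =====
-- stated objective: simpler
-- what changed: Replaces A's nested segment loops (outer stride-2^(parity+1) range plus inner per-segment loop with a break) by a single forward pass over all data positions that tests bit `parity` of the index to decide coverage.
import Mathlib
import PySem

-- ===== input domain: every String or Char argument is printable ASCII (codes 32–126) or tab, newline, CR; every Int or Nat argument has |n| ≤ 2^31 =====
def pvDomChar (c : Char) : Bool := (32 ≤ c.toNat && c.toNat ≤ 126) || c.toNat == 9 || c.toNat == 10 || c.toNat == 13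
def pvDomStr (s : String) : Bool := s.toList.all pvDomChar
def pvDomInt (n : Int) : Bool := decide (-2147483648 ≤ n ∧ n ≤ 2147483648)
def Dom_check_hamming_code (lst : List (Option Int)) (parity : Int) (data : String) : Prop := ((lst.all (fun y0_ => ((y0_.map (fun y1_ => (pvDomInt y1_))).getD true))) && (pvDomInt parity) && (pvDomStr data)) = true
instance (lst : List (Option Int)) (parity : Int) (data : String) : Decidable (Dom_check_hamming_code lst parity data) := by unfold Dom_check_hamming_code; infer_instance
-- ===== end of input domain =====

-- B replaces A's nested segment loops by one forward pass testing bit `parity` of each index (objective: simpler).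
-- Equivalence of the RETURN value; neither version mutates its arguments (both work on copies of lst).

-- ===== PORT A =====
-- one covered position: count '1', blank it in lst1, increment it in lst2 when present
-- (indices reached are always < data.length, so getD is exact; a set out of lst's range
--  is the IndexError case, excluded by Pre_)
def pvStepA (data : List Char) (st : Int × List (Option Int) × List (Option Int)) (i : Nat) :
    Int × List (Option Int) × List (Option Int) :=
  ((if data.getD i ' ' = '1' then st.1 + 1 else st.1),
   st.2.1.set i none,
   (match st.2.2.getD i none with
    | some v => st.2.2.set i (some (v + 1))
    | none => st.2.2))

-- the inner `for bits_to_check in range(data_index, data_index + 2**parity)` with its break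
def pvInnerA (data : List Char) (stop : Nat)
    (st : Int × List (Option Int) × List (Option Int)) (j : Nat) :
    Int × List (Option Int) × List (Option Int) :=
  if h : j < stop then
    if data.length ≤ j then st
    else pvInnerA data stop (pvStepA data st j) (j + 1)
  else st
termination_by stop - j

def check_hamming_code (lst : List (Option Int)) (parity : Int) (data : String) : List (Option Int) :=
  -- parity.toNat: Pre_ demands parity ≥ 0 (Python raises TypeError on a negative parity);
  -- d.toNat: every element of this range is ≥ 2^parity ≥ 1 > 0, so toNat is exact
  let st := (PySem.List.pyRange ((2 : Int) ^ parity.toNat) (data.toList.length)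
        ((2 : Int) ^ (parity.toNat + 1))).foldl
      (fun st d => pvInnerA data.toList (d.toNat + 2 ^ parity.toNat) st d.toNat) ((0 : Int), lst, lst)
  if st.1 % 2 = 0 then st.2.1 else st.2.2

-- ===== PORT B =====
def check_hamming_code_alt (lst : List (Option Int)) (parity : Int) (data : String) : List (Option Int) :=
  -- `(i >> parity) & 1` is Nat.testBit i parity.toNat (parity ≥ 0 under Pre_)
  let st := (List.range data.toList.length).foldl
      (fun st i =>
        if Nat.testBit i parity.toNat then
          ((if data.toList.getD i ' ' = '1' then st.1 + 1 else st.1),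
           st.2.1.set i none,
           (match st.2.2.getD i none with
            | some v => st.2.2.set i (some (v + 1))
            | none => st.2.2))
        else st) ((0 : Int), lst, lst)
  if st.1 % 2 = 0 then st.2.1 else st.2.2

-- ===== PRECONDITION & SPEC =====
-- Pre_ = exactly the inputs where Python A returns: parity must be ≥ 0 (range(2**parity,…)
-- raises TypeError on the float 2**negative), and every covered position (index < len(data)
-- with bit `parity` set) must be < len(lst) (otherwise lst1[...] = None raises IndexError).
def Pre_check_hamming_code (lst : List (Option Int)) (parity : Int) (data : String) : Prop :=
  0 ≤ parity ∧ ∀ i ∈ List.range data.toList.length, Nat.testBit i parity.toNat → i < lst.length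
instance (lst : List (Option Int)) (parity : Int) (data : String) : Decidable (Pre_check_hamming_code lst parity data) := by unfold Pre_check_hamming_code; infer_instance

def pvWitness_check_hamming_code : List (Option Int) × Int × String :=
  ([some 1, some 2, some 3, some 4], 0, "0110")

def Spec_check_hamming_code (lst : List (Option Int)) (parity : Int) (data : String) (out : List (Option Int)) : Prop := out = check_hamming_code_alt lst parity data
instance (lst : List (Option Int)) (parity : Int) (data : String) (out : List (Option Int)) : Decidable (Spec_check_hamming_code lst parity data out) := by unfold Spec_check_hamming_code; infer_instance

-- ===== CLAIM (what is proved, stated in full; the proofs are below) =====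
def Claim_equal_check_hamming_code : Prop := ∀ (lst : List (Option Int)) (parity : Int) (data : String), Dom_check_hamming_code lst parity data → Pre_check_hamming_code lst parity data → Spec_check_hamming_code lst parity data (check_hamming_code lst parity data)

-- ===== LEMMAS AND PROOFS =====

theorem pvInnerA_eq_foldl (data : List Char) (stop : Nat)
    (st : Int × List (Option Int) × List (Option Int)) (j : Nat) :
    pvInnerA data stop st j =
      List.foldl (pvStepA data) st
        ((List.range' j (stop - j)).filter (fun i => decide (i < data.length))) := by
  fun_induction pvInnerA with
  | case1 st j h hlen =>
    have : ((List.range' j (stop - j)).filter (fun i => decide (i < data.length))) = [] := by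
      rw [List.filter_eq_nil_iff]
      intro a ha
      have := List.mem_range'.1 ha
      simp only [decide_eq_true_eq]
      omega
    simp [this]
  | case2 st j h hlen ih =>
    have h1 : stop - j = (stop - (j+1)) + 1 := by omega
    rw [h1, List.range'_succ]
    simp only [List.filter_cons, decide_eq_true_eq]
    rw [if_pos (by omega)]
    simpa using ih
  | case3 st j h =>
    have : stop - j = 0 := by omega
    simp [this]


theorem pv_bit_iff (p x : Nat) : Nat.testBit x p = true ↔ 2 ^ p ≤ x % (2 ^ (p + 1)) := by
  have he : 0 < 2 ^ p := Nat.two_pow_pos p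
  have h1 : x % (2 ^ p * 2) / 2 ^ p = x / 2 ^ p % 2 := Nat.mod_mul_right_div_self x (2 ^ p) 2
  have h2 : (2 : Nat) ^ (p + 1) = 2 ^ p * 2 := by ring
  have hlt : x % (2 ^ p * 2) < 2 ^ p * 2 := Nat.mod_lt _ (by omega)
  have d1 : 1 ≤ x % (2 ^ p * 2) / 2 ^ p ↔ 2 ^ p ≤ x % (2 ^ p * 2) := Nat.one_le_div_iff he
  have d2 : x % (2 ^ p * 2) / 2 ^ p < 2 ↔ x % (2 ^ p * 2) < 2 * 2 ^ p := Nat.div_lt_iff_lt_mul he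
  rw [Nat.testBit_eq_decide_div_mod_eq, decide_eq_true_eq, h2, ← h1]
  omega

theorem pv_mem_cover (p n x : Nat) :
    x ∈ (PySem.List.pyRange ((2 : Int) ^ p) (n : Int) ((2 : Int) ^ (p + 1))).flatMap
        (fun d => (List.range' d.toNat (2 ^ p)).filter (fun i => decide (i < n))) ↔
      x < n ∧ Nat.testBit x p = true := by
  have he : 0 < 2 ^ p := Nat.two_pow_pos p
  have hs : (0 : Int) < (2 : Int) ^ (p + 1) := by positivity
  have hep : (2 : Nat) ^ (p + 1) = 2 * 2 ^ p := by ring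
  rw [List.mem_flatMap]
  constructor
  · rintro ⟨d, hd, hx⟩
    rw [PySem.List.mem_pyRange_iff_of_pos hs] at hd
    obtain ⟨hd1, hd2, m, hm⟩ := hd
    rw [List.mem_filter, List.mem_range'] at hx
    obtain ⟨⟨i, hi, hxi⟩, hxn⟩ := hx
    simp only [decide_eq_true_eq] at hxn
    refine ⟨hxn, ?_⟩
    rw [pv_bit_iff]
    have hpe : (0:Int) < (2:Int)^p := by positivity
    have hm0 : 0 ≤ m := by
      by_contra hneg
      have : m ≤ -1 := by omega
      have : (2:Int)^(p+1) * m ≤ (2:Int)^(p+1) * (-1) := by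
        exact mul_le_mul_of_nonneg_left this (le_of_lt hs)
      omega
    have hdn : (d.toNat : Int) = d := Int.toNat_of_nonneg (by omega)
    have hdn2 : d.toNat = 2 ^ p + 2 ^ (p + 1) * m.toNat := by
      have : ((2 ^ p + 2 ^ (p + 1) * m.toNat : Nat) : Int) = d := by
        push_cast [Int.toNat_of_nonneg hm0]; omega
      omega
    have hxeq : x = (2 ^ p + i) + 2 ^ (p + 1) * m.toNat := by omega
    have : x % 2 ^ (p + 1) = (2 ^ p + i) % 2 ^ (p + 1) := by
      rw [hxeq, Nat.add_mul_mod_self_left]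
    rw [this, Nat.mod_eq_of_lt (by omega)]
    omega
  · rintro ⟨hxn, hbit⟩
    rw [pv_bit_iff] at hbit
    set q := x / (2 ^ (p + 1)) with hq
    set r := x % (2 ^ (p + 1)) with hr
    have hx : x = 2 ^ (p + 1) * q + r := (Nat.div_add_mod x (2 ^ (p + 1))).symm
    have hrlt : r < 2 ^ (p + 1) := Nat.mod_lt _ (by omega)
    have c1 : (((2 ^ p : Nat) : Int)) = (2 : Int) ^ p := by push_cast; ring
    have c2 : (((2 ^ (p + 1) : Nat) : Int)) = (2 : Int) ^ (p + 1) := by push_cast; ring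
    refine ⟨(((2 ^ p + 2 ^ (p + 1) * q : Nat) : Int)), ?_, ?_⟩
    · rw [PySem.List.mem_pyRange_iff_of_pos hs]
      refine ⟨?_, ?_, ⟨(q : Int), ?_⟩⟩
      · rw [← c1, Int.ofNat_le]; omega
      · rw [Int.ofNat_lt]; omega
      · rw [← c1, ← c2]; push_cast; ring
    · rw [List.mem_filter, List.mem_range']
      rw [Int.toNat_natCast]
      refine ⟨⟨r - 2 ^ p, by omega, by omega⟩, by simp only [decide_eq_true_eq]; omega⟩

theorem pv_pairwise_cover (p n : Nat) :
    List.Pairwise (· < ·)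
      ((PySem.List.pyRange ((2 : Int) ^ p) (n : Int) ((2 : Int) ^ (p + 1))).flatMap
        (fun d => (List.range' d.toNat (2 ^ p)).filter (fun i => decide (i < n)))) := by
  have hs : (0 : Int) < (2 : Int) ^ (p + 1) := by positivity
  have hL : List.Pairwise (· < ·)
      (PySem.List.pyRange ((2 : Int) ^ p) (n : Int) ((2 : Int) ^ (p + 1))) := by
    rw [PySem.List.pyRange_of_pos _ _ hs]
    rw [List.pairwise_map]
    refine List.pairwise_lt_range.imp ?_
    intro k1 k2 h
    have : (2 : Int) ^ (p + 1) * (k1 : Int) < (2 : Int) ^ (p + 1) * (k2 : Int) :=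
      mul_lt_mul_of_pos_left (by exact_mod_cast h) hs
    omega
  rw [List.pairwise_flatMap]
  refine ⟨fun d _ => (List.pairwise_lt_range' 1).filter _, ?_⟩
  refine hL.imp_of_mem ?_
  intro d1 d2 hd1 hd2 hlt x hx y hy
  rw [PySem.List.mem_pyRange_iff_of_pos hs] at hd1 hd2
  obtain ⟨ha1, hb1, m1, hm1⟩ := hd1
  obtain ⟨ha2, hb2, m2, hm2⟩ := hd2
  rw [List.mem_filter, List.mem_range'] at hx hy
  obtain ⟨⟨i, hi, hxi⟩, -⟩ := hx
  obtain ⟨⟨j, hj, hyj⟩, -⟩ := hy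
  have hm12 : m1 < m2 := by
    by_contra hc
    have : (2 : Int) ^ (p + 1) * m2 ≤ (2 : Int) ^ (p + 1) * m1 :=
      mul_le_mul_of_nonneg_left (by omega) (le_of_lt hs)
    omega
  have hgap : d1 + (2 : Int) ^ (p + 1) ≤ d2 := by
    have h12 : (2 : Int) ^ (p + 1) * (m1 + 1) ≤ (2 : Int) ^ (p + 1) * m2 :=
      mul_le_mul_of_nonneg_left (by omega) (le_of_lt hs)
    rw [mul_add, mul_one] at h12
    omega
  have c1 : (((2 ^ p : Nat) : Int)) = (2 : Int) ^ p := by push_cast; ring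
  have c2 : (((2 ^ (p + 1) : Nat) : Int)) = (2 : Int) ^ (p + 1) := by push_cast; ring
  have ht1 : ((d1.toNat : Int)) = d1 := Int.toNat_of_nonneg (by omega)
  have ht2 : ((d2.toNat : Int)) = d2 := Int.toNat_of_nonneg (by omega)
  have hep : (2 : Nat) ^ (p + 1) = 2 * 2 ^ p := by ring
  have cpp : (2 : Int) ^ (p + 1) = 2 * (2 : Int) ^ p := by ring
  have hpe : (0 : Int) < (2 : Int) ^ p := by positivity
  have hkey : d1.toNat + 2 ^ p ≤ d2.toNat := by omega
  -- x < d1.toNat + 2^p ≤ d2.toNat ≤ y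
  omega

theorem pv_cover_eq (p n : Nat) :
    (PySem.List.pyRange ((2 : Int) ^ p) (n : Int) ((2 : Int) ^ (p + 1))).flatMap
        (fun d => (List.range' d.toNat (2 ^ p)).filter (fun i => decide (i < n))) =
      (List.range n).filter (fun i => Nat.testBit i p) := by
  have pw1 := pv_pairwise_cover p n
  have pw2 : List.Pairwise (· < ·) ((List.range n).filter (fun i => Nat.testBit i p)) :=
    List.pairwise_lt_range.filter _
  refine List.Perm.eq_of_pairwise
    (fun a b _ _ h1 h2 => absurd h2 (Nat.lt_asymm h1)) pw1 pw2 ?_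
  refine (List.perm_ext_iff_of_nodup (pw1.imp Nat.ne_of_lt) (pw2.imp Nat.ne_of_lt)).2 ?_
  intro a
  rw [pv_mem_cover, List.mem_filter, List.mem_range]

-- ===== VERDICT (by name: the statement is the Claim_ definition above) =====
theorem check_hamming_code_spec : Claim_equal_check_hamming_code := by
  intro lst parity data _ _
  unfold Spec_check_hamming_code check_hamming_code check_hamming_code_alt
  have hfun : (fun (st : Int × List (Option Int) × List (Option Int)) (d : Int) =>
        pvInnerA data.toList (d.toNat + 2 ^ parity.toNat) st d.toNat)
      = (fun st d => List.foldl (pvStepA data.toList) st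
          ((List.range' d.toNat (2 ^ parity.toNat)).filter
            (fun i => decide (i < data.toList.length)))) := by
    funext st d
    rw [pvInnerA_eq_foldl, Nat.add_sub_cancel_left]
  rw [hfun, ← List.foldl_flatMap, pv_cover_eq parity.toNat data.toList.length,
    List.foldl_filter]
  rfl
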